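-- pv_equiv track=rewrite | github.com/rdchan/CS6320-NLP | hw3/hw3.py | get_feature_and_label_dictionaries
-- ===== SOURCE A (Python) =====
-- def get_feature_and_label_dictionaries(common_features, corpus_tags):
--     position_idx = 0
--     feature_dict = {}
--     for feature in common_features:
--         if not feature in feature_dict:
--             feature_dict[feature] = position_idx
--             position_idx = position_idx + 1
--
--     position_idx = 0
--     tag_dict = {}
--     for sentence in corpus_tags:
--         for word_tag in sentence:
--             if not word_tag in tag_dict:
--                 tag_dict[word_tag] = position_idx
--                 position_idx = position_idx + 1
--     return (feature_dict, tag_dict)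
--     pass
-- ===== SOURCE B (Python) =====
-- def get_feature_and_label_dictionaries(common_features, corpus_tags):
--     def index_by_first_occurrence(keys):
--         # reversed overwrite pass: after it, first[k] = index of k's FIRST occurrence
--         first = {}
--         for i, k in reversed(list(enumerate(keys))):
--             first[k] = i
--         # sort distinct keys by first-occurrence position, ranks are the indices
--         by_position = sorted(first.items(), key=lambda kv: kv[1])
--         return {k: rank for rank, (k, _) in enumerate(by_position)}
--     flat_tags = [t for sentence in corpus_tags for t in sentence]
--     return (index_by_first_occurrence(common_features), index_by_first_occurrence(flat_tags))
-- ===== Notes on version B (the rewrite author's own statement) =====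
-- stated objective: alternative
-- what changed: Replaces A's single interleaved pass (membership test + manual counter) with a sort-based algorithm: a reversed overwrite pass records each key's first-occurrence position with no membership check, the distinct keys are then sorted by that position, and their ranks under enumerate become the indices.
import Mathlib
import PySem

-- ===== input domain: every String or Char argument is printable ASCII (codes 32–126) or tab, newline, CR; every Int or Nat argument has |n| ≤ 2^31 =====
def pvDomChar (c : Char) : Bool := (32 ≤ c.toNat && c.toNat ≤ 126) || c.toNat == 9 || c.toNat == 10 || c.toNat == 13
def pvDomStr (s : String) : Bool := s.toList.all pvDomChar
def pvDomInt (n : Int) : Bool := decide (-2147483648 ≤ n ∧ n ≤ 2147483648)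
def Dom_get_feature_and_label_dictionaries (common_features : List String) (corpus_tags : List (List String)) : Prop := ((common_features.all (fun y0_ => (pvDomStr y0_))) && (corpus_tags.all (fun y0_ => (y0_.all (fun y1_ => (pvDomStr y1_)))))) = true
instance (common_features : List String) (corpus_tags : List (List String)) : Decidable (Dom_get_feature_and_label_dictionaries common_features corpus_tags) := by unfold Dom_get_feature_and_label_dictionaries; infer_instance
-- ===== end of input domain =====

-- B replaces A's interleaved membership-test-and-counter pass by a sort-based algorithm:
-- a reversed overwrite pass records each key's first-occurrence position, the distinct keys
-- are sorted by that position, and ranks become the indices (alternative algorithm, same result).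

-- ===== PORT A =====
-- the body of both of A's loops: 'if not k in d: d[k] = idx; idx += 1' on state (d, idx)
def pvStepA (st : PySem.Dict String Int × Int) (k : String) : PySem.Dict String Int × Int :=
  if st.1.contains k then st else (st.1.insert k st.2, st.2 + 1)

def get_feature_and_label_dictionaries (common_features : List String) (corpus_tags : List (List String)) : (List (String × Int)) × (List (String × Int)) :=
  -- first loop: over common_features
  let fd := common_features.foldl pvStepA (PySem.Dict.empty, 0)
  -- second loop: nested, over sentences then word_tags
  let td := corpus_tags.foldl (fun st sentence => sentence.foldl pvStepA st) (PySem.Dict.empty, 0)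
  (fd.1.items, td.1.items)

-- ===== PORT B =====
-- 'for i, k in reversed(list(enumerate(keys))): first[k] = i'
def pvFirstOcc (ks : List String) : PySem.Dict String Int :=
  ((PySem.List.enumerate ks 0).reverse).foldl (fun d p => d.insert p.2 p.1) PySem.Dict.empty

-- sorted(first.items(), key=lambda kv: kv[1]);  {k: rank for rank, (k, _) in enumerate(...)}
def pvIndexByFirstOcc (ks : List String) : PySem.Dict String Int :=
  let byPos := PySem.List.sorted (pvFirstOcc ks).items (fun kv => kv.2) false
  PySem.Dict.ofList ((PySem.List.enumerate byPos 0).map (fun q => (q.2.1, q.1)))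

def get_feature_and_label_dictionaries_alt (common_features : List String) (corpus_tags : List (List String)) : (List (String × Int)) × (List (String × Int)) :=
  let flat_tags := corpus_tags.flatMap (fun s => s)   -- [t for sentence in corpus_tags for t in sentence]
  ((pvIndexByFirstOcc common_features).items, (pvIndexByFirstOcc flat_tags).items)

-- ===== PRECONDITION & SPEC =====
def Spec_get_feature_and_label_dictionaries (common_features : List String) (corpus_tags : List (List String)) (out : (List (String × Int)) × (List (String × Int))) : Prop := out = get_feature_and_label_dictionaries_alt common_features corpus_tags
instance (common_features : List String) (corpus_tags : List (List String)) (out : (List (String × Int)) × (List (String × Int))) : Decidable (Spec_get_feature_and_label_dictionaries common_features corpus_tags out) := by unfold Spec_get_feature_and_label_dictionaries; infer_instance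

-- ===== CLAIM (what is proved, stated in full; the proofs are below) =====
def Claim_equal_get_feature_and_label_dictionaries : Prop := ∀ (common_features : List String) (corpus_tags : List (List String)), Dom_get_feature_and_label_dictionaries common_features corpus_tags → Spec_get_feature_and_label_dictionaries common_features corpus_tags (get_feature_and_label_dictionaries common_features corpus_tags)

-- ===== LEMMAS AND PROOFS =====

-- first-occurrence index of k in ks, counting from s
def pvFidx (ks : List String) (k : String) (s : Int) : Option Int :=
  match ks with
  | [] => none
  | x :: t => if x = k then some s else pvFidx t k (s + 1)

lemma pvFidx_mem (ks : List String) (k : String) (s : Int) (h : k ∈ ks) :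
    ∃ j, pvFidx ks k s = some j ∧ s ≤ j := by
  induction ks generalizing s with
  | nil => cases h
  | cons x t ih =>
    by_cases hx : x = k
    · exact ⟨s, by simp [pvFidx, hx], le_refl s⟩
    · have hm : k ∈ t := by cases h with | head => exact absurd rfl hx | tail _ h => exact h
      obtain ⟨j, hj, hle⟩ := ih (s + 1) hm
      exact ⟨j, by simp [pvFidx, hx, hj], by omega⟩

-- A's loop from state (d, n): appends (key, index) pairs for the not-yet-seen distinct keys of xs
lemma pvLoopA_eq (xs : List String) (d : PySem.Dict String Int) (n : Int) (hn : d.keys.Nodup) :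
    xs.foldl pvStepA (d, n)
      = (PySem.Dict.mk (d.items ++ (PySem.List.enumerate ((PySem.Set.ofList xs).filter (fun y => !(d.keys.contains y))) n).map (fun p => (p.2, p.1))),
         n + ((PySem.Set.ofList xs).filter (fun y => !(d.keys.contains y))).length) := by
  induction xs generalizing d n with
  | nil => simp [PySem.Set.ofList_nil]
  | cons x t ih =>
    have hdisc : ∀ (s : PySem.Set String) (z : String),
        PySem.Set.discard s z = s.filter (fun y => !(y == z)) := fun _ _ => rfl
    by_cases hc : d.contains x = true
    · have hxk : d.keys.contains x = true := by
        simpa using (PySem.Dict.contains_iff_mem_keys d x).mp hc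
      have hf : (PySem.Set.ofList (x :: t)).filter (fun y => !(d.keys.contains y))
          = (PySem.Set.ofList t).filter (fun y => !(d.keys.contains y)) := by
        rw [PySem.Set.ofList_cons, List.filter_cons]
        simp only [hxk, Bool.not_true, Bool.false_eq_true, reduceIte]
        rw [hdisc, List.filter_filter]
        apply List.filter_congr
        intro y _
        by_cases hyx : y = x
        · subst hyx; simpa using hxk
        · simp [hyx]
      simp only [List.foldl_cons, pvStepA, hc, if_true]
      rw [ih d n hn, hf]
    · have hxk : d.keys.contains x = false := by
        by_contra h
        have hm : x ∈ d.keys := by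
          simpa using Bool.not_eq_false _ |>.mp h
        exact hc ((PySem.Dict.contains_iff_mem_keys d x).mpr hm)
      have hcf : d.contains x = false := by simpa using hc
      simp only [List.foldl_cons, pvStepA, hcf, Bool.false_eq_true, if_false]
      have hn' : (d.insert x n).keys.Nodup := PySem.Dict.nodup_keys_insert d x n hn
      rw [ih (d.insert x n) (n + 1) hn']
      have hkeys : (d.insert x n).keys = d.keys ++ [x] :=
        PySem.Dict.keys_insert_of_not_contains d n hcf
      have hitems : (d.insert x n).items = d.items ++ [(x, n)] :=
        PySem.Dict.items_insert_of_not_contains d n hcf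
      have hfilt : (PySem.Set.ofList t).filter (fun y => !((d.keys ++ [x]).contains y))
          = ((PySem.Set.discard (PySem.Set.ofList t) x)).filter (fun y => !(d.keys.contains y)) := by
        rw [hdisc, List.filter_filter]
        apply List.filter_congr
        intro y _
        by_cases hyx : y = x
        · subst hyx; simp
        · simp [hyx]
      have hxm : x ∉ d.keys := by simpa using hxk
      have hhead : (PySem.Set.ofList (x :: t)).filter (fun y => !(d.keys.contains y))
          = x :: (PySem.Set.ofList t).filter (fun y => !((d.keys ++ [x]).contains y)) := by
        rw [PySem.Set.ofList_cons, List.filter_cons, hfilt]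
        simp [hxm, hdisc]
      rw [hkeys, hitems, hhead]
      simp only [PySem.List.enumerate_cons, List.map_cons, List.length_cons]
      refine Prod.ext ?_ ?_
      · simp
      · push_cast; ring

-- A's items from the initial state: the distinct keys enumerated from 0
lemma pvLoopA_items (ks : List String) :
    (ks.foldl pvStepA (PySem.Dict.empty, 0)).1.items
      = (PySem.List.enumerate (PySem.List.dedup ks) 0).map (fun p => (p.2, p.1)) := by
  rw [pvLoopA_eq ks PySem.Dict.empty 0 (by simp)]
  simp [show (PySem.Dict.empty : PySem.Dict String Int).items = [] from rfl,
        show (PySem.Dict.empty : PySem.Dict String Int).keys = [] from rfl]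

-- get? of the reversed overwrite pass is the first-occurrence index
lemma pvFirstOcc_get? (ks : List String) (k : String) :
    (pvFirstOcc ks).get? k = pvFidx ks k 0 := by
  unfold pvFirstOcc
  rw [List.foldl_reverse]
  suffices h : ∀ (s : Int),
      ((PySem.List.enumerate ks s).foldr (fun p d => d.insert p.2 p.1) PySem.Dict.empty).get? k
        = pvFidx ks k s from h 0
  induction ks with
  | nil => intro s; simp [PySem.List.enumerate_nil, pvFidx, PySem.Dict.get?_empty]
  | cons x t ih =>
    intro s
    rw [PySem.List.enumerate_cons]
    simp only [List.foldr_cons, pvFidx]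
    rw [PySem.Dict.get?_insert]
    by_cases hx : x = k
    · simp [hx]
    · simp only [hx, if_false]
      rw [if_neg (fun h => hx h.symm)]
      exact ih (s + 1)

lemma pvFirstOcc_keys (ks : List String) :
    (pvFirstOcc ks).keys = PySem.Set.ofList ks.reverse := by
  unfold pvFirstOcc
  have h := PySem.Dict.keys_foldl_insert_key ((PySem.List.enumerate ks 0).reverse)
      (fun p => p.2) (fun _ p => p.1) PySem.Dict.empty
  rw [h]
  have : ((PySem.List.enumerate ks 0).reverse).map (fun p : Int × String => p.2) = ks.reverse := by
    rw [List.map_reverse, PySem.List.map_snd_enumerate]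
  simp [PySem.Set.update, this, PySem.Set.ofList_eq_foldl,
        show (PySem.Dict.empty : PySem.Dict String Int).keys = [] from rfl]

lemma pvFirstOcc_nodup (ks : List String) : (pvFirstOcc ks).keys.Nodup := by
  rw [pvFirstOcc_keys]; exact PySem.Set.nodup_ofList _

-- the dedup list carries strictly increasing first-occurrence indices
lemma pvDedup_fidx_lt (ks : List String) (s : Int) :
    (PySem.List.dedup ks).Pairwise
      (fun a b => (pvFidx ks a s).getD 0 < (pvFidx ks b s).getD 0) := by
  induction ks generalizing s with
  | nil => simp [PySem.List.dedup]
  | cons x t ih =>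
    have hdd : PySem.List.dedup (x :: t)
        = x :: (PySem.List.dedup t).filter (fun y => !(y == x)) := by
      simp [PySem.List.dedup_eq_ofList, PySem.Set.ofList_cons, PySem.Set.discard]
    rw [hdd]
    constructor
    · intro b hb
      have hbx : b ≠ x := by
        have := List.of_mem_filter hb; simpa using this
      have hbt : b ∈ t := by
        have := List.mem_of_mem_filter hb
        simpa [PySem.List.mem_dedup] using this
      obtain ⟨j, hj, hle⟩ := pvFidx_mem t b (s + 1) hbt
      have hxb : ¬ (x = b) := fun h => hbx h.symm
      simp only [pvFidx, if_neg hxb, hj, Option.getD_some, if_true]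
      omega
    · have hp := (ih (s + 1)).filter (fun y => !(y == x))
      refine hp.imp_of_mem ?_
      intro a b ha hb hab
      have hax : a ≠ x := by have := List.of_mem_filter ha; simpa using this
      have hbx : b ≠ x := by have := List.of_mem_filter hb; simpa using this
      have hxa : ¬ (x = a) := fun h => hax h.symm
      have hxb : ¬ (x = b) := fun h => hbx h.symm
      simp only [pvFidx, if_neg hxa, if_neg hxb]
      exact hab

-- sorting the first-occurrence items by position yields the dedup list with its indices
lemma pvSorted_items (ks : List String) :
    PySem.List.sorted (pvFirstOcc ks).items (fun kv => kv.2) false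
      = (PySem.List.dedup ks).map (fun k => (k, ((pvFirstOcc ks).get? k).getD 0)) := by
  apply PySem.List.sorted_eq_of_perm_of_pairwise_lt
  · -- permutation: items = keys.map pairing, keys ~ dedup ks
    have hitems : (pvFirstOcc ks).items
        = (pvFirstOcc ks).keys.map (fun k => (k, (pvFirstOcc ks).getD k 0)) :=
      PySem.Dict.items_eq_map_keys _ (pvFirstOcc_nodup ks) 0
    have hperm : (PySem.List.dedup ks).Perm (pvFirstOcc ks).keys := by
      rw [pvFirstOcc_keys, PySem.List.dedup_eq_ofList]
      refine (List.perm_ext_iff_of_nodup (PySem.Set.nodup_ofList _) (PySem.Set.nodup_ofList _)).mpr ?_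
      intro a; simp [PySem.Set.mem_ofList]
    rw [hitems]
    have h1 : (pvFirstOcc ks).keys.map (fun k => (k, (pvFirstOcc ks).getD k 0))
        = (pvFirstOcc ks).keys.map (fun k => (k, ((pvFirstOcc ks).get? k).getD 0)) := by
      apply List.map_congr_left
      intro a _
      simp [PySem.Dict.getD_eq_get?_getD]
    rw [h1]
    exact hperm.map _
  · -- strictly increasing positions along dedup ks
    have hp := pvDedup_fidx_lt ks 0
    refine (List.pairwise_map).mpr ?_
    refine hp.imp_of_mem ?_
    intro a b _ _ hab
    simpa [pvFirstOcc_get?] using hab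

-- enumerate over a mapped list
lemma pvEnumerate_map {α β : Type} (f : α → β) (l : List α) (s : Int) :
    PySem.List.enumerate (l.map f) s = (PySem.List.enumerate l s).map (fun p => (p.1, f p.2)) := by
  induction l generalizing s with
  | nil => simp [PySem.List.enumerate_nil]
  | cons x t ih => simp [PySem.List.enumerate_cons, ih]

-- B's comprehension over distinct keys has exactly its pairs as items
lemma pvOfList_items (l : List (Int × (String × Int))) (hnd : (l.map (fun q => q.2.1)).Nodup) :
    (PySem.Dict.ofList (l.map (fun q => (q.2.1, q.1)))).items
      = l.map (fun q => (q.2.1, q.1)) := by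
  have hfresh : ∀ p ∈ l.map (fun q : Int × (String × Int) => (q.2.1, q.1)),
      (PySem.Dict.empty : PySem.Dict String Int).contains p.1 = false := by
    intro p _; simp [PySem.Dict.contains_empty]
  have hnodup : ((l.map (fun q : Int × (String × Int) => (q.2.1, q.1))).map (fun p => p.1)).Nodup := by
    rw [List.map_map]; exact hnd
  have h := PySem.Dict.items_foldl_insert_fresh
      (l.map (fun q : Int × (String × Int) => (q.2.1, q.1)))
      (fun p => p.1) (fun p => p.2) PySem.Dict.empty hfresh hnodup
  simpa using h

-- B's index map has the same items as A's loop
lemma pvIndexByFirstOcc_items (ks : List String) :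
    (pvIndexByFirstOcc ks).items
      = (PySem.List.enumerate (PySem.List.dedup ks) 0).map (fun p => (p.2, p.1)) := by
  unfold pvIndexByFirstOcc
  simp only [pvSorted_items, pvEnumerate_map]
  rw [List.map_map]
  have hnd : (((PySem.List.enumerate (PySem.List.dedup ks) 0).map
      (fun p => (p.1, (p.2, ((pvFirstOcc ks).get? p.2).getD 0)))).map (fun q => q.2.1)).Nodup := by
    rw [List.map_map]
    have : ((PySem.List.enumerate (PySem.List.dedup ks) 0).map
        ((fun q : Int × (String × Int) => q.2.1) ∘ (fun p : Int × String => (p.1, (p.2, ((pvFirstOcc ks).get? p.2).getD 0)))))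
        = PySem.List.dedup ks := by
      simp [Function.comp_def, PySem.List.map_snd_enumerate]
    rw [this]; simp [PySem.List.dedup_eq_ofList, PySem.Set.nodup_ofList]
  have h := pvOfList_items ((PySem.List.enumerate (PySem.List.dedup ks) 0).map
      (fun p => (p.1, (p.2, ((pvFirstOcc ks).get? p.2).getD 0)))) hnd
  rw [List.map_map] at h
  simpa [Function.comp_def] using h

-- ===== VERDICT (by name: the statement is the Claim_ definition above) =====
theorem get_feature_and_label_dictionaries_spec : Claim_equal_get_feature_and_label_dictionaries := by
  intro cf ct _
  unfold Spec_get_feature_and_label_dictionaries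
  unfold get_feature_and_label_dictionaries get_feature_and_label_dictionaries_alt
  simp only
  rw [← List.foldl_flatMap, pvLoopA_items, pvLoopA_items,
      pvIndexByFirstOcc_items, pvIndexByFirstOcc_items]
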